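-- pv_equiv track=rewrite | github.com/sayfxmansoor019/video-transcription-project | scripts/reaction_annotations.py | annotate_reactions
-- ===== SOURCE A (Python) =====
-- def annotate_reactions(transcript_segments: list) -> list:
--     """
--     Annotate reactions to specific statements.
--     Returns list of reactions, aligned with transcript segments.
--     """
--     reactions = []
--     for seg in transcript_segments:
--         text = seg["text"].lower()
--         if any(word in text for word in ["wow", "amazing", "great"]):
--             reactions.append("Positive")
--         elif any(word in text for word in ["uh", "hmm", "wait"]):
--             reactions.append("Thinking")
--         elif any(word in text for word in ["sorry", "unfortunately"]):
--             reactions.append("Negative")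
--         else:
--             reactions.append("Neutral")
--     return reactions
-- ===== SOURCE B (Python) =====
-- _KEYWORDS = [
--     ("wow", 0), ("amazing", 0), ("great", 0),
--     ("uh", 1), ("hmm", 1), ("wait", 1),
--     ("sorry", 2), ("unfortunately", 2),
-- ]
-- _LABELS = ["Positive", "Thinking", "Negative", "Neutral"]
--
--
-- def annotate_reactions(transcript_segments: list) -> list:
--     reactions = []
--     for seg in transcript_segments:
--         text = seg["text"].lower()
--         best = 3
--         for i in range(len(text)):
--             for kw, rank in _KEYWORDS:
--                 if rank < best and text.startswith(kw, i):
--                     best = rank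
--         reactions.append(_LABELS[best])
--     return reactions
-- ===== Notes on version B (the rewrite author's own statement) =====
-- stated objective: alternative
-- what changed: A tests each keyword by substring membership in an if/elif chain; B instead makes a single left-to-right scan of each text, checking at every position which keywords start there (naive multi-pattern matching), keeps the minimum priority rank matched, and indexes a label table with it.
import Mathlib
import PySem

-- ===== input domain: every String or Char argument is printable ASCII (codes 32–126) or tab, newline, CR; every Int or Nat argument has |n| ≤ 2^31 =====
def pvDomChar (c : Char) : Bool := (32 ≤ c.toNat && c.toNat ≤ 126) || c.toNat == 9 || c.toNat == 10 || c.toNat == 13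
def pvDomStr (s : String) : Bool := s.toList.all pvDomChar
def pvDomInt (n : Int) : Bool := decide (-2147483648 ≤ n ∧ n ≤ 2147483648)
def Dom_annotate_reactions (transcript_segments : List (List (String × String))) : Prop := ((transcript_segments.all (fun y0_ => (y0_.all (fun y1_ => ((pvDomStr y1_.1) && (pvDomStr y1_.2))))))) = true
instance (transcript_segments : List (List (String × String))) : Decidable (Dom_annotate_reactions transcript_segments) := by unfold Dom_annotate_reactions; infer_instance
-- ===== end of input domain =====

-- B replaces A's per-keyword substring-membership if/elif chain by a single left-to-right
-- scan of each text that checks which keywords start at each position (naive multi-pattern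
-- matcher), keeping the minimum priority rank and indexing a label table (objective: alternative).

-- ===== PORT A =====
def annotate_reactions (transcript_segments : List (List (String × String))) : List String :=
  transcript_segments.foldl (fun reactions seg =>
    let text := PySem.Str.lower (PySem.Dict.getD (PySem.Dict.mk seg) "text" "")
    if ["wow", "amazing", "great"].any (fun w => PySem.Str.isIn w text) then
      reactions ++ ["Positive"]
    else if ["uh", "hmm", "wait"].any (fun w => PySem.Str.isIn w text) then
      reactions ++ ["Thinking"]
    else if ["sorry", "unfortunately"].any (fun w => PySem.Str.isIn w text) then
      reactions ++ ["Negative"]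
    else
      reactions ++ ["Neutral"]) []

-- ===== PORT B =====
def pvKeywords : List (List Char × Nat) :=
  [("wow".toList, 0), ("amazing".toList, 0), ("great".toList, 0),
   ("uh".toList, 1), ("hmm".toList, 1), ("wait".toList, 1),
   ("sorry".toList, 2), ("unfortunately".toList, 2)]

def pvLabels : List String := ["Positive", "Thinking", "Negative", "Neutral"]

-- B's nested scan: for i in range(len(text)): for kw, rank in _KEYWORDS: if rank < best and
-- text.startswith(kw, i): best = rank.  text.startswith(kw, i) with 0 ≤ i < len(text) is
-- exactly Chars.startswith (t.drop i) kw on the code-point list.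
def pvBestRank (t : List Char) : Nat :=
  (List.range t.length).foldl (fun best i =>
    pvKeywords.foldl (fun b p =>
      if p.2 < b ∧ PySem.Chars.startswith (t.drop i) p.1 = true then p.2 else b) best) 3

-- _LABELS[best]: best ≤ 3 always holds, so List.getD is exact (Python never raises here).
def annotate_reactions_alt (transcript_segments : List (List (String × String))) : List String :=
  transcript_segments.foldl (fun reactions seg =>
    let t := (PySem.Str.lower (PySem.Dict.getD (PySem.Dict.mk seg) "text" "")).toList
    reactions ++ [pvLabels.getD (pvBestRank t) ""]) []

-- ===== PRECONDITION & SPEC =====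
-- Pre_ excludes segments without a "text" key, on which Python A (and B) raises KeyError.
def Pre_annotate_reactions (transcript_segments : List (List (String × String))) : Prop :=
  (transcript_segments.all (fun seg => (PySem.Dict.get? (PySem.Dict.mk seg) "text").isSome)) = true
instance (transcript_segments : List (List (String × String))) : Decidable (Pre_annotate_reactions transcript_segments) := by unfold Pre_annotate_reactions; infer_instance

def pvWitness_annotate_reactions : (List (List (String × String))) := [[("text", "wow")], [("text", "hello")]]

def Spec_annotate_reactions (transcript_segments : List (List (String × String))) (out : List String) : Prop := out = annotate_reactions_alt transcript_segments
instance (transcript_segments : List (List (String × String))) (out : List String) : Decidable (Spec_annotate_reactions transcript_segments out) := by unfold Spec_annotate_reactions; infer_instance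

-- ===== CLAIM (what is proved, stated in full; the proofs are below) =====
def Claim_equal_annotate_reactions : Prop := ∀ (transcript_segments : List (List (String × String))), Dom_annotate_reactions transcript_segments → Pre_annotate_reactions transcript_segments → Spec_annotate_reactions transcript_segments (annotate_reactions transcript_segments)

-- ===== LEMMAS AND PROOFS =====

-- B's guarded update 'if rank < best: best = rank (when matched)' is a min-update.
lemma guard_eq (sw : List Char → Bool) (kws : List (List Char × Nat)) (b : Nat) :
    kws.foldl (fun b p => if p.2 < b ∧ sw p.1 = true then p.2 else b) b
    = kws.foldl (fun b p => if sw p.1 = true then min b p.2 else b) b := by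
  induction kws generalizing b with
  | nil => rfl
  | cons p ps ih =>
    simp only [List.foldl_cons]
    rcases h : sw p.1 with _ | _ <;> simp [h]
    · exact ih b
    · rcases Nat.lt_or_ge p.2 b with hlt | hge
      · rw [if_pos hlt, Nat.min_eq_right (Nat.le_of_lt hlt), ih]
      · rw [if_neg (by omega), Nat.min_eq_left hge, ih]

lemma fold2_le_iff (sw : List Char → Bool) (kws : List (List Char × Nat)) (b r : Nat) :
    kws.foldl (fun b p => if sw p.1 = true then min b p.2 else b) b ≤ r
      ↔ b ≤ r ∨ ∃ p ∈ kws, sw p.1 = true ∧ p.2 ≤ r := by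
  induction kws generalizing b with
  | nil => simp
  | cons p ps ih =>
    simp only [List.foldl_cons, ih, List.mem_cons]
    rcases h : sw p.1 with _ | _ <;> simp [h, min_le_iff] <;> aesop

lemma foldl_fold2_le_iff (sw2 : Nat → List Char → Bool) (l : List Nat) (a r : Nat) :
    l.foldl (fun best i => pvKeywords.foldl
        (fun b p => if sw2 i p.1 = true then min b p.2 else b) best) a ≤ r
      ↔ a ≤ r ∨ ∃ i ∈ l, ∃ p ∈ pvKeywords, sw2 i p.1 = true ∧ p.2 ≤ r := by
  induction l generalizing a with
  | nil => simp
  | cons x xs ih =>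
    simp only [List.foldl_cons, ih, fold2_le_iff, List.mem_cons]
    aesop

lemma bestRank_le_iff (t : List Char) (r : Nat) :
    pvBestRank t ≤ r ↔ 3 ≤ r ∨
      ∃ i < t.length, ∃ p ∈ pvKeywords,
        PySem.Chars.startswith (t.drop i) p.1 = true ∧ p.2 ≤ r := by
  rw [pvBestRank]
  have hfun : (fun (best : Nat) (i : Nat) =>
      pvKeywords.foldl (fun b p =>
        if p.2 < b ∧ PySem.Chars.startswith (t.drop i) p.1 = true then p.2 else b) best)
      = (fun best i => pvKeywords.foldl
          (fun b p => if PySem.Chars.startswith (t.drop i) p.1 = true then min b p.2 else b) best) := by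
    funext b i; exact guard_eq _ _ b
  rw [hfun, foldl_fold2_le_iff (fun i kw => PySem.Chars.startswith (t.drop i) kw)]
  simp [List.mem_range]

lemma infix_iff_pos (kw t : List Char) (hk : kw ≠ []) :
    kw <:+: t ↔ ∃ i < t.length, kw <+: t.drop i := by
  constructor
  · rintro ⟨s, u, h⟩
    refine ⟨s.length, ?_, ?_⟩
    · have := List.length_pos_of_ne_nil hk
      have hlen : t.length = s.length + kw.length + u.length := by
        rw [← h]; simp [List.length_append]; omega
      omega
    · rw [← h, List.append_assoc, List.drop_left]
      exact ⟨u, rfl⟩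
  · rintro ⟨i, _, hp⟩
    exact hp.isInfix.trans (List.drop_suffix i t).isInfix


lemma bestRank_le3 (t : List Char) : pvBestRank t ≤ 3 :=
  (bestRank_le_iff t 3).mpr (Or.inl le_rfl)

lemma bestRank_le0_iff (t : List Char) :
    pvBestRank t ≤ 0 ↔
      ("wow".toList <:+: t ∨ "amazing".toList <:+: t ∨ "great".toList <:+: t) := by
  rw [bestRank_le_iff,
    infix_iff_pos "wow".toList t (by decide),
    infix_iff_pos "amazing".toList t (by decide),
    infix_iff_pos "great".toList t (by decide)]
  simp only [pvKeywords, List.mem_cons, List.not_mem_nil, PySem.Chars.startswith_iff]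
  constructor
  · rintro (h | ⟨i, hi, p, hp, hsw, hr⟩)
    · omega
    · rcases hp with rfl | rfl | rfl | rfl | rfl | rfl | rfl | rfl | h'
      all_goals first
        | exact Or.inl ⟨i, hi, hsw⟩
        | exact Or.inr (Or.inl ⟨i, hi, hsw⟩)
        | exact Or.inr (Or.inr ⟨i, hi, hsw⟩)
        | omega
        | exact absurd h' (by simp)
  · rintro (⟨i, hi, h⟩ | ⟨i, hi, h⟩ | ⟨i, hi, h⟩)
    · exact Or.inr ⟨i, hi, _, Or.inl rfl, h, le_rfl⟩
    · exact Or.inr ⟨i, hi, _, Or.inr (Or.inl rfl), h, le_rfl⟩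
    · exact Or.inr ⟨i, hi, _, Or.inr (Or.inr (Or.inl rfl)), h, le_rfl⟩

lemma bestRank_le1_iff (t : List Char) :
    pvBestRank t ≤ 1 ↔
      ("wow".toList <:+: t ∨ "amazing".toList <:+: t ∨ "great".toList <:+: t ∨
       "uh".toList <:+: t ∨ "hmm".toList <:+: t ∨ "wait".toList <:+: t) := by
  rw [bestRank_le_iff,
    infix_iff_pos "wow".toList t (by decide),
    infix_iff_pos "amazing".toList t (by decide),
    infix_iff_pos "great".toList t (by decide),
    infix_iff_pos "uh".toList t (by decide),
    infix_iff_pos "hmm".toList t (by decide),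
    infix_iff_pos "wait".toList t (by decide)]
  simp only [pvKeywords, List.mem_cons, List.not_mem_nil, PySem.Chars.startswith_iff]
  constructor
  · rintro (h | ⟨i, hi, p, hp, hsw, hr⟩)
    · omega
    · rcases hp with rfl | rfl | rfl | rfl | rfl | rfl | rfl | rfl | h'
      · exact Or.inl ⟨i, hi, hsw⟩
      · exact Or.inr (Or.inl ⟨i, hi, hsw⟩)
      · exact Or.inr (Or.inr (Or.inl ⟨i, hi, hsw⟩))
      · exact Or.inr (Or.inr (Or.inr (Or.inl ⟨i, hi, hsw⟩)))
      · exact Or.inr (Or.inr (Or.inr (Or.inr (Or.inl ⟨i, hi, hsw⟩))))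
      · exact Or.inr (Or.inr (Or.inr (Or.inr (Or.inr ⟨i, hi, hsw⟩))))
      · omega
      · omega
      · exact absurd h' (by simp)
  · rintro (⟨i, hi, h⟩ | ⟨i, hi, h⟩ | ⟨i, hi, h⟩ | ⟨i, hi, h⟩ | ⟨i, hi, h⟩ | ⟨i, hi, h⟩)
    · exact Or.inr ⟨i, hi, _, Or.inl rfl, h, by omega⟩
    · exact Or.inr ⟨i, hi, _, Or.inr (Or.inl rfl), h, by omega⟩
    · exact Or.inr ⟨i, hi, _, Or.inr (Or.inr (Or.inl rfl)), h, by omega⟩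
    · exact Or.inr ⟨i, hi, _, Or.inr (Or.inr (Or.inr (Or.inl rfl))), h, by omega⟩
    · exact Or.inr ⟨i, hi, _, Or.inr (Or.inr (Or.inr (Or.inr (Or.inl rfl)))), h, by omega⟩
    · exact Or.inr ⟨i, hi, _, Or.inr (Or.inr (Or.inr (Or.inr (Or.inr (Or.inl rfl))))), h, by omega⟩

lemma bestRank_le2_iff (t : List Char) :
    pvBestRank t ≤ 2 ↔
      ("wow".toList <:+: t ∨ "amazing".toList <:+: t ∨ "great".toList <:+: t ∨
       "uh".toList <:+: t ∨ "hmm".toList <:+: t ∨ "wait".toList <:+: t ∨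
       "sorry".toList <:+: t ∨ "unfortunately".toList <:+: t) := by
  rw [bestRank_le_iff,
    infix_iff_pos "wow".toList t (by decide),
    infix_iff_pos "amazing".toList t (by decide),
    infix_iff_pos "great".toList t (by decide),
    infix_iff_pos "uh".toList t (by decide),
    infix_iff_pos "hmm".toList t (by decide),
    infix_iff_pos "wait".toList t (by decide),
    infix_iff_pos "sorry".toList t (by decide),
    infix_iff_pos "unfortunately".toList t (by decide)]
  simp only [pvKeywords, List.mem_cons, List.not_mem_nil, PySem.Chars.startswith_iff]
  constructor
  · rintro (h | ⟨i, hi, p, hp, hsw, hr⟩)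
    · omega
    · rcases hp with rfl | rfl | rfl | rfl | rfl | rfl | rfl | rfl | h'
      · exact Or.inl ⟨i, hi, hsw⟩
      · exact Or.inr (Or.inl ⟨i, hi, hsw⟩)
      · exact Or.inr (Or.inr (Or.inl ⟨i, hi, hsw⟩))
      · exact Or.inr (Or.inr (Or.inr (Or.inl ⟨i, hi, hsw⟩)))
      · exact Or.inr (Or.inr (Or.inr (Or.inr (Or.inl ⟨i, hi, hsw⟩))))
      · exact Or.inr (Or.inr (Or.inr (Or.inr (Or.inr (Or.inl ⟨i, hi, hsw⟩)))))
      · exact Or.inr (Or.inr (Or.inr (Or.inr (Or.inr (Or.inr (Or.inl ⟨i, hi, hsw⟩))))))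
      · exact Or.inr (Or.inr (Or.inr (Or.inr (Or.inr (Or.inr (Or.inr ⟨i, hi, hsw⟩))))))
      · exact absurd h' (by simp)
  · rintro (⟨i, hi, h⟩ | ⟨i, hi, h⟩ | ⟨i, hi, h⟩ | ⟨i, hi, h⟩ | ⟨i, hi, h⟩ | ⟨i, hi, h⟩ | ⟨i, hi, h⟩ | ⟨i, hi, h⟩)
    · exact Or.inr ⟨i, hi, _, Or.inl rfl, h, by omega⟩
    · exact Or.inr ⟨i, hi, _, Or.inr (Or.inl rfl), h, by omega⟩
    · exact Or.inr ⟨i, hi, _, Or.inr (Or.inr (Or.inl rfl)), h, by omega⟩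
    · exact Or.inr ⟨i, hi, _, Or.inr (Or.inr (Or.inr (Or.inl rfl))), h, by omega⟩
    · exact Or.inr ⟨i, hi, _, Or.inr (Or.inr (Or.inr (Or.inr (Or.inl rfl)))), h, by omega⟩
    · exact Or.inr ⟨i, hi, _, Or.inr (Or.inr (Or.inr (Or.inr (Or.inr (Or.inl rfl))))), h, by omega⟩
    · exact Or.inr ⟨i, hi, _, Or.inr (Or.inr (Or.inr (Or.inr (Or.inr (Or.inr (Or.inl rfl)))))), h, by omega⟩
    · exact Or.inr ⟨i, hi, _, Or.inr (Or.inr (Or.inr (Or.inr (Or.inr (Or.inr (Or.inr (Or.inl rfl))))))), h, by omega⟩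

-- A's if/elif chain on one segment's text equals B's label-table lookup at the min scan rank.
set_option maxHeartbeats 1000000 in
lemma classify_eq (text : String) :
    (if ["wow", "amazing", "great"].any (fun w => PySem.Str.isIn w text) then "Positive"
     else if ["uh", "hmm", "wait"].any (fun w => PySem.Str.isIn w text) then "Thinking"
     else if ["sorry", "unfortunately"].any (fun w => PySem.Str.isIn w text) then "Negative"
     else "Neutral") = pvLabels.getD (pvBestRank text.toList) "" := by
  have h0 : (["wow", "amazing", "great"].any (fun w => PySem.Str.isIn w text)) = true ↔
      ("wow".toList <:+: text.toList ∨ "amazing".toList <:+: text.toList ∨ "great".toList <:+: text.toList) := by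
    simp [PySem.Chars.isIn_iff_infix]
  have h1 : (["uh", "hmm", "wait"].any (fun w => PySem.Str.isIn w text)) = true ↔
      ("uh".toList <:+: text.toList ∨ "hmm".toList <:+: text.toList ∨ "wait".toList <:+: text.toList) := by
    simp [PySem.Chars.isIn_iff_infix]
  have h2 : (["sorry", "unfortunately"].any (fun w => PySem.Str.isIn w text)) = true ↔
      ("sorry".toList <:+: text.toList ∨ "unfortunately".toList <:+: text.toList) := by
    simp [PySem.Chars.isIn_iff_infix]
  have hle3 := bestRank_le3 text.toList
  split_ifs with c0 c1 c2
  · have : pvBestRank text.toList = 0 :=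
      Nat.le_zero.mp ((bestRank_le0_iff text.toList).mpr (h0.mp c0))
    rw [this]; rfl
  · have hne0 : ¬ pvBestRank text.toList ≤ 0 := fun h =>
      c0 (h0.mpr ((bestRank_le0_iff text.toList).mp h))
    have hle1 : pvBestRank text.toList ≤ 1 := by
      rw [bestRank_le1_iff]
      rcases h1.mp c1 with h | h | h
      · exact Or.inr (Or.inr (Or.inr (Or.inl h)))
      · exact Or.inr (Or.inr (Or.inr (Or.inr (Or.inl h))))
      · exact Or.inr (Or.inr (Or.inr (Or.inr (Or.inr h))))
    have : pvBestRank text.toList = 1 := by omega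
    rw [this]; rfl
  · have hne1 : ¬ pvBestRank text.toList ≤ 1 := fun h => by
      rcases (bestRank_le1_iff text.toList).mp h with h' | h' | h' | h' | h' | h'
      · exact c0 (h0.mpr (Or.inl h'))
      · exact c0 (h0.mpr (Or.inr (Or.inl h')))
      · exact c0 (h0.mpr (Or.inr (Or.inr h')))
      · exact c1 (h1.mpr (Or.inl h'))
      · exact c1 (h1.mpr (Or.inr (Or.inl h')))
      · exact c1 (h1.mpr (Or.inr (Or.inr h')))
    have hle2 : pvBestRank text.toList ≤ 2 := by
      rw [bestRank_le2_iff]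
      rcases h2.mp c2 with h | h
      · exact Or.inr (Or.inr (Or.inr (Or.inr (Or.inr (Or.inr (Or.inl h))))))
      · exact Or.inr (Or.inr (Or.inr (Or.inr (Or.inr (Or.inr (Or.inr h))))))
    have : pvBestRank text.toList = 2 := by omega
    rw [this]; rfl
  · have hne2 : ¬ pvBestRank text.toList ≤ 2 := fun h => by
      rcases (bestRank_le2_iff text.toList).mp h with h'|h'|h'|h'|h'|h'|h'|h'
      · exact c0 (h0.mpr (Or.inl h'))
      · exact c0 (h0.mpr (Or.inr (Or.inl h')))
      · exact c0 (h0.mpr (Or.inr (Or.inr h')))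
      · exact c1 (h1.mpr (Or.inl h'))
      · exact c1 (h1.mpr (Or.inr (Or.inl h')))
      · exact c1 (h1.mpr (Or.inr (Or.inr h')))
      · exact c2 (h2.mpr (Or.inl h'))
      · exact c2 (h2.mpr (Or.inr h'))
    have : pvBestRank text.toList = 3 := by omega
    rw [this]; rfl

lemma folds_eq (ts : List (List (String × String))) (acc : List String) :
    ts.foldl (fun reactions seg =>
      let text := PySem.Str.lower (PySem.Dict.getD (PySem.Dict.mk seg) "text" "")
      if ["wow", "amazing", "great"].any (fun w => PySem.Str.isIn w text) then
        reactions ++ ["Positive"]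
      else if ["uh", "hmm", "wait"].any (fun w => PySem.Str.isIn w text) then
        reactions ++ ["Thinking"]
      else if ["sorry", "unfortunately"].any (fun w => PySem.Str.isIn w text) then
        reactions ++ ["Negative"]
      else
        reactions ++ ["Neutral"]) acc
    = ts.foldl (fun reactions seg =>
        let t := (PySem.Str.lower (PySem.Dict.getD (PySem.Dict.mk seg) "text" "")).toList
        reactions ++ [pvLabels.getD (pvBestRank t) ""]) acc := by
  induction ts generalizing acc with
  | nil => rfl
  | cons seg rest ih =>
    simp only [List.foldl_cons]
    rw [← ih]
    congr 1
    rw [← classify_eq (PySem.Str.lower (PySem.Dict.getD (PySem.Dict.mk seg) "text" ""))]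
    split_ifs <;> rfl

-- ===== VERDICT (by name: the statement is the Claim_ definition above) =====
theorem annotate_reactions_spec : Claim_equal_annotate_reactions := by
  intro ts _ _
  show annotate_reactions ts = annotate_reactions_alt ts
  rw [annotate_reactions, annotate_reactions_alt]
  exact folds_eq ts []
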